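-- pv_equiv track=rewrite | github.com/Raj1192/FMSE_Project | smt_repair/dynamic_input.py | _split_on_op
-- ===== SOURCE A (Python) =====
-- def _split_on_op(expr, op):
--     """Split on op, but only at paren depth 0."""
--     parts = []
--     depth = 0
--     current = ""
--     for c in expr:
--         if c == "(":
--             depth += 1
--             current += c
--         elif c == ")":
--             depth -= 1
--             current += c
--         elif c == op and depth == 0:
--             if op == "-" and not current.strip():
--                 current += c  # unary minus, keep going
--             else:
--                 parts.append(current.strip())
--                 current = ""
--         else:
--             current += c
--     if current.strip():
--         parts.append(current.strip())
--     return parts if len(parts) > 1 else [expr]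
-- ===== SOURCE B (Python) =====
-- def _split_on_op(expr, op):
--     """Split on op at paren depth 0: first collect cut indices, then build parts by slicing."""
--     cuts = []
--     depth = 0
--     start = 0
--     for i, c in enumerate(expr):
--         if c == "(":
--             depth += 1
--         elif c == ")":
--             depth -= 1
--         elif c == op and depth == 0:
--             if not (op == "-" and not expr[start:i].strip()):
--                 cuts.append(i)
--                 start = i + 1
--     parts = []
--     start = 0
--     for i in cuts:
--         parts.append(expr[start:i].strip())
--         start = i + 1
--     tail = expr[start:].strip()
--     if tail:
--         parts.append(tail)
--     return parts if len(parts) > 1 else [expr]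
-- ===== Notes on version B (the rewrite author's own statement) =====
-- stated objective: alternative
-- what changed: B replaces A's single interleaved scan that builds stripped parts while walking chars by a two-phase decomposition: a first scan over (index, char) pairs that only tracks depth and records cut indices, and a second pass that builds the parts by slicing the original string at those indices.
import Mathlib
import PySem

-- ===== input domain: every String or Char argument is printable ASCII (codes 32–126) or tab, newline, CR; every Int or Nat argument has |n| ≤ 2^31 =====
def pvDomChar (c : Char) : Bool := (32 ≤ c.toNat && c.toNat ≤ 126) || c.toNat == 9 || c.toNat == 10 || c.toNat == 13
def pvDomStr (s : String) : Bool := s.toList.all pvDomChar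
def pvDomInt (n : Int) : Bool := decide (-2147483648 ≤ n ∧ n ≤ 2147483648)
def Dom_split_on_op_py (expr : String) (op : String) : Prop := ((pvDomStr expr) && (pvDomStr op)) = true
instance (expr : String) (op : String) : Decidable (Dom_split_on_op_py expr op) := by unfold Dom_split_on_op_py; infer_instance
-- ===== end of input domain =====

-- B changes the decomposition: A builds stripped parts in one interleaved scan; B first records cut
-- indices at depth 0, then builds the parts by slicing (objective: alternative; same behaviour).

-- ===== PORT A =====
-- one loop step of A: state (parts, depth, current)
def stepA (op : List Char) (st : List (List Char) × Int × List Char) (c : Char) :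
    List (List Char) × Int × List Char :=
  if c = '(' then (st.1, st.2.1 + 1, st.2.2 ++ [c])
  else if c = ')' then (st.1, st.2.1 - 1, st.2.2 ++ [c])
  else if [c] = op ∧ st.2.1 = 0 then
    (if op = ['-'] ∧ PySem.Chars.strip st.2.2 = [] then (st.1, st.2.1, st.2.2 ++ [c])
     else (st.1 ++ [PySem.Chars.strip st.2.2], st.2.1, []))
  else (st.1, st.2.1, st.2.2 ++ [c])

def split_on_op_py (expr : String) (op : String) : List String :=
  let fin := expr.toList.foldl (stepA op.toList) ([], 0, [])
  let parts := if PySem.Chars.strip fin.2.2 ≠ [] then fin.1 ++ [PySem.Chars.strip fin.2.2] else fin.1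
  if parts.length > 1 then parts.map String.mk else [expr]

-- ===== PORT B =====
-- phase-1 step of B: state (cuts, depth, start), input (i, c) from enumerate
def stepB (cs : List Char) (op : List Char) (st : List Int × Int × Int) (p : Int × Char) :
    List Int × Int × Int :=
  if p.2 = '(' then (st.1, st.2.1 + 1, st.2.2)
  else if p.2 = ')' then (st.1, st.2.1 - 1, st.2.2)
  else if [p.2] = op ∧ st.2.1 = 0 then
    (if ¬ (op = ['-'] ∧ PySem.Chars.strip (PySem.List.slice cs (some st.2.2) (some p.1)) = [])
     then (st.1 ++ [p.1], st.2.1, p.1 + 1)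
     else (st.1, st.2.1, st.2.2))
  else (st.1, st.2.1, st.2.2)

-- phase-2 step of B: state (parts, start), consumes one cut index
def phase2step (cs : List Char) (st : List (List Char) × Int) (i : Int) : List (List Char) × Int :=
  (st.1 ++ [PySem.Chars.strip (PySem.List.slice cs (some st.2) (some i))], i + 1)

def phase2 (cs : List Char) (cuts : List Int) : List (List Char) × Int :=
  cuts.foldl (phase2step cs) ([], 0)

def split_on_op_py_alt (expr : String) (op : String) : List String :=
  let cs := expr.toList
  let p1 := (PySem.List.enumerate cs 0).foldl (stepB cs op.toList) ([], 0, 0)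
  let p2 := phase2 cs p1.1
  let tail := PySem.Chars.strip (PySem.List.slice cs (some p2.2) none)
  let parts := if tail ≠ [] then p2.1 ++ [tail] else p2.1
  if parts.length > 1 then parts.map String.mk else [expr]

-- ===== PRECONDITION & SPEC =====
def Spec_split_on_op_py (expr : String) (op : String) (out : List String) : Prop := out = split_on_op_py_alt expr op
instance (expr : String) (op : String) (out : List String) : Decidable (Spec_split_on_op_py expr op out) := by unfold Spec_split_on_op_py; infer_instance

-- ===== CLAIM (what is proved, stated in full; the proofs are below) =====
def Claim_equal_split_on_op_py : Prop := ∀ (expr : String) (op : String), Dom_split_on_op_py expr op → Spec_split_on_op_py expr op (split_on_op_py expr op)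

-- ===== LEMMAS AND PROOFS =====

-- A's running `current` equals B's pending slice expr[start:k]
lemma current_eq_slice (cs : List Char) (start k : Nat) :
    PySem.List.slice cs (some (start : Int)) (some (k : Int)) = (cs.take k).drop start := by
  rw [PySem.List.slice_natCast]
  exact List.extract_eq_drop_take' ..

lemma take_succ_drop (cs : List Char) (k start : Nat) (c : Char) (hk : cs.drop k = c :: (cs.drop (k+1)))
    (hs : start ≤ k) :
    (cs.take (k+1)).drop start = (cs.take k).drop start ++ [c] := by
  have hkl : k < cs.length := by
    by_contra h
    simp [List.drop_eq_nil_of_le (le_of_not_gt h)] at hk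
  have hc : cs[k]? = some c := by
    have h0 : (cs.drop k)[0]? = cs[k+0]? := List.getElem?_drop ..
    rw [hk] at h0; simpa using h0.symm
  rw [List.take_add_one, hc]
  rw [List.drop_append_of_le_length (by simp [List.length_take]; omega)]
  simp

-- the loop invariant: A's fold state is the phase-2 rendering of B's fold state
lemma loop_inv (op cs : List Char) :
    ∀ (l : List Char) (k start : Nat) (cuts : List Int) (depth : Int),
      cs.drop k = l → start ≤ k → (phase2 cs cuts).2 = (start : Int) →
      ∃ start' : Nat,
        start' ≤ k + l.length ∧
        (phase2 cs (List.foldl (stepB cs op) (cuts, depth, (start : Int)) (PySem.List.enumerate l (k : Int))).1).2 = (start' : Int) ∧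
        List.foldl (stepA op) ((phase2 cs cuts).1, depth, (cs.take k).drop start) l
          = ((phase2 cs (List.foldl (stepB cs op) (cuts, depth, (start : Int)) (PySem.List.enumerate l (k : Int))).1).1,
             (List.foldl (stepB cs op) (cuts, depth, (start : Int)) (PySem.List.enumerate l (k : Int))).2.1,
             (cs.take (k + l.length)).drop start') := by
  intro l
  induction l with
  | nil =>
    intro k start cuts depth hk hs h3
    exact ⟨start, by simpa using hs, by simpa [PySem.List.enumerate] using h3, by simp [PySem.List.enumerate]⟩
  | cons c l' ih =>
    intro k start cuts depth hk hs h3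
    have hlen : k + (c :: l').length = k + 1 + l'.length := by simp [List.length_cons]; omega
    have hk' : cs.drop (k+1) = l' := by
      have ht := congrArg List.tail hk
      simpa [List.tail_drop] using ht
    have hkc : cs.drop k = c :: cs.drop (k+1) := by rw [hk', hk]
    have hcur : (cs.take (k+1)).drop start = (cs.take k).drop start ++ [c] :=
      take_succ_drop cs k start c hkc hs
    have hcast : (k : Int) + 1 = ((k+1 : Nat) : Int) := by push_cast; ring
    rw [PySem.List.enumerate_cons, hcast]
    simp only [List.foldl_cons]
    by_cases h1 : c = '('
    · rw [show stepA op ((phase2 cs cuts).1, depth, (cs.take k).drop start) c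
            = ((phase2 cs cuts).1, depth + 1, (cs.take k).drop start ++ [c]) by simp [stepA, h1]]
      rw [show stepB cs op (cuts, depth, (start : Int)) ((k : Int), c)
            = (cuts, depth + 1, (start : Int)) by simp [stepB, h1]]
      rw [← hcur]
      obtain ⟨s', hle, hph, heq⟩ := ih (k+1) start cuts (depth+1) hk' (by omega) h3
      exact ⟨s', by omega, hph, by rw [heq, hlen]⟩
    · by_cases h2 : c = ')'
      · rw [show stepA op ((phase2 cs cuts).1, depth, (cs.take k).drop start) c
              = ((phase2 cs cuts).1, depth - 1, (cs.take k).drop start ++ [c]) by simp [stepA, h2]]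
        rw [show stepB cs op (cuts, depth, (start : Int)) ((k : Int), c)
              = (cuts, depth - 1, (start : Int)) by simp [stepB, h2]]
        rw [← hcur]
        obtain ⟨s', hle, hph, heq⟩ := ih (k+1) start cuts (depth-1) hk' (by omega) h3
        exact ⟨s', by omega, hph, by rw [heq, hlen]⟩
      · by_cases h4 : [c] = op ∧ depth = 0
        · have hsl : PySem.Chars.strip (PySem.List.slice cs (some (start : Int)) (some (k : Int)))
              = PySem.Chars.strip ((cs.take k).drop start) := by rw [current_eq_slice]
          by_cases h5 : op = ['-'] ∧ PySem.Chars.strip ((cs.take k).drop start) = []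
          · -- unary minus: both keep going
            rw [show stepA op ((phase2 cs cuts).1, depth, (cs.take k).drop start) c
                  = ((phase2 cs cuts).1, depth, (cs.take k).drop start ++ [c]) by
                simp [stepA, h1, h2, h4, h5]]
            rw [show stepB cs op (cuts, depth, (start : Int)) ((k : Int), c)
                  = (cuts, depth, (start : Int)) by
                simp [stepB, h1, h2, h4, hsl, h5]]
            rw [← hcur]
            obtain ⟨s', hle, hph, heq⟩ := ih (k+1) start cuts depth hk' (by omega) h3
            exact ⟨s', by omega, hph, by rw [heq, hlen]⟩
          · -- genuine cut
            rw [show stepA op ((phase2 cs cuts).1, depth, (cs.take k).drop start) c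
                  = ((phase2 cs cuts).1 ++ [PySem.Chars.strip ((cs.take k).drop start)], depth, []) by
                simp [stepA, h1, h2, h4, h5]]
            rw [show stepB cs op (cuts, depth, (start : Int)) ((k : Int), c)
                  = (cuts ++ [(k : Int)], depth, (k : Int) + 1) by
                simp [stepB, h1, h2, h4, hsl, h5]]
            rw [hcast]
            have hph2 : phase2 cs (cuts ++ [(k : Int)])
                = ((phase2 cs cuts).1 ++ [PySem.Chars.strip ((cs.take k).drop start)], (k : Int) + 1) := by
              rw [phase2, List.foldl_append]
              rw [show (List.foldl (phase2step cs) ([], 0) cuts) = phase2 cs cuts from rfl]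
              simp [phase2step, h3, hsl]
            have hnil : ([] : List Char) = (cs.take (k+1)).drop (k+1) := by
              rw [List.drop_eq_nil_of_le (by simp [List.length_take])]
            obtain ⟨s', hle, hph, heq⟩ := ih (k+1) (k+1) (cuts ++ [(k : Int)]) depth hk' (by omega)
              (by rw [hph2]; push_cast; ring)
            rw [hph2] at heq
            simp only [] at heq
            refine ⟨s', by omega, hph, ?_⟩
            rw [hnil, heq, hlen]
        · -- ordinary character
          rw [show stepA op ((phase2 cs cuts).1, depth, (cs.take k).drop start) c
                = ((phase2 cs cuts).1, depth, (cs.take k).drop start ++ [c]) by simp [stepA, h1, h2, h4]]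
          rw [show stepB cs op (cuts, depth, (start : Int)) ((k : Int), c)
                = (cuts, depth, (start : Int)) by simp [stepB, h1, h2, h4]]
          rw [← hcur]
          obtain ⟨s', hle, hph, heq⟩ := ih (k+1) start cuts depth hk' (by omega) h3
          exact ⟨s', by omega, hph, by rw [heq, hlen]⟩

-- ===== VERDICT (by name: the statement is the Claim_ definition above) =====
theorem split_on_op_py_spec : Claim_equal_split_on_op_py := by
  intro expr op _hdom
  unfold Spec_split_on_op_py split_on_op_py split_on_op_py_alt
  obtain ⟨s', hle, hph, heq⟩ := loop_inv op.toList expr.toList expr.toList 0 0 [] 0 rfl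
    (le_refl 0) (by simp [phase2])
  simp only [phase2, List.foldl_nil, List.take_zero, List.drop_nil, Nat.cast_zero, zero_add,
    List.take_length] at heq hph
  simp only [heq, hph, phase2, PySem.List.slice_from_natCast]
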